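-- pv_equiv track=rewrite | github.com/mileswijeyeratne/AOC | python/2022/Day 23 Unstable Diffusion/1a_1.py | find_empty_squares
-- ===== SOURCE A (Python) =====
-- def find_empty_squares(elves):
--     max_row = 0
--     min_row = 0
--     max_col = 0
--     min_col = 0
--     for elve in elves:
--         if elve[0] > max_row:
--             max_row = elve[0]
--         elif elve[0] < min_row:
--             min_row = elve[0]
--         if elve[1] > max_col:
--             max_col = elve[1]
--         elif elve[1] < min_col:
--             min_col = elve[1]
--     d_row = max_row - min_row + 1
--     d_col = max_col - min_col + 1
--     total_squares = d_row * d_col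
--     return total_squares - len(elves)
-- ===== SOURCE B (Python) =====
-- def find_empty_squares(elves):
--     rs = sorted([r for r, _ in elves] + [0])
--     cs = sorted([c for _, c in elves] + [0])
--     return (rs[-1] - rs[0] + 1) * (cs[-1] - cs[0] + 1) - len(elves)
-- ===== Notes on version B (the rewrite author's own statement) =====
-- stated objective: alternative
-- what changed: Replaces A's single running-extrema loop (four if/elif updates per elf) by a sort-based scheme: each coordinate list (with the 0 seed appended, reproducing A's origin-included bounds) is sorted once and the bounding box is read off as first and last elements.
import Mathlib
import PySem

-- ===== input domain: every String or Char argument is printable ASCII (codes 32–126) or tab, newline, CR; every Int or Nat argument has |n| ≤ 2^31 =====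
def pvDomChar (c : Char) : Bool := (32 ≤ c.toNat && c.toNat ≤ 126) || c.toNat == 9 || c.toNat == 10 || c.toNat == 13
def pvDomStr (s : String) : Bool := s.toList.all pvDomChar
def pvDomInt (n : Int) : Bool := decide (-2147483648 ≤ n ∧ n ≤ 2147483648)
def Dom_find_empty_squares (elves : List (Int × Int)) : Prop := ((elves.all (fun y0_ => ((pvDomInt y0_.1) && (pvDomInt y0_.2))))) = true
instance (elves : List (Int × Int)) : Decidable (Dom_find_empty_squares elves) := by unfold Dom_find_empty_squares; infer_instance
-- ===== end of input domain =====

-- B replaces A's running-extrema loop by sorting each 0-seeded coordinate list once and reading the bounds off its ends (alternative algorithm, O(n log n)).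

-- ===== PORT A =====
-- A's loop: running max/min of rows and cols, all seeded at 0, with the if/elif branch structure kept.
def find_empty_squares (elves : List (Int × Int)) : Int :=
  let s := elves.foldl
    (fun (st : Int × Int × Int × Int) elve =>
      let maxR := st.1; let minR := st.2.1; let maxC := st.2.2.1; let minC := st.2.2.2
      let (maxR, minR) :=
        if elve.1 > maxR then (elve.1, minR)
        else if elve.1 < minR then (maxR, elve.1)
        else (maxR, minR)
      let (maxC, minC) :=
        if elve.2 > maxC then (elve.2, minC)
        else if elve.2 < minC then (maxC, elve.2)
        else (maxC, minC)
      (maxR, minR, maxC, minC))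
    (0, 0, 0, 0)
  let d_row := s.1 - s.2.1 + 1
  let d_col := s.2.2.1 - s.2.2.2 + 1
  let total_squares := d_row * d_col
  total_squares - (elves.length : Int)

-- ===== PORT B =====
-- rs and cs are nonempty by construction (the appended 0), so Python's rs[0]/rs[-1] never raise; the .getD 0 is unreachable.
def find_empty_squares_alt (elves : List (Int × Int)) : Int :=
  let rs := PySem.List.sorted (elves.map (·.1) ++ [0]) (fun x => x) false
  let cs := PySem.List.sorted (elves.map (·.2) ++ [0]) (fun x => x) false
  ((PySem.List.pyGet? rs (-1)).getD 0 - (PySem.List.pyGet? rs 0).getD 0 + 1) *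
    ((PySem.List.pyGet? cs (-1)).getD 0 - (PySem.List.pyGet? cs 0).getD 0 + 1) -
    (elves.length : Int)

-- ===== PRECONDITION & SPEC =====
def Spec_find_empty_squares (elves : List (Int × Int)) (out : Int) : Prop := out = find_empty_squares_alt elves
instance (elves : List (Int × Int)) (out : Int) : Decidable (Spec_find_empty_squares elves out) := by unfold Spec_find_empty_squares; infer_instance

-- ===== CLAIM (what is proved, stated in full; the proofs are below) =====
def Claim_equal_find_empty_squares : Prop := ∀ (elves : List (Int × Int)), Dom_find_empty_squares elves → Spec_find_empty_squares elves (find_empty_squares elves)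

-- ===== LEMMAS AND PROOFS =====

-- A's loop, from any state with min ≤ max on each axis, computes the four independent running extrema.
theorem pv_loop_extrema (elves : List (Int × Int)) :
    ∀ (mr nr mc nc : Int), nr ≤ mr → nc ≤ mc →
    elves.foldl
      (fun (st : Int × Int × Int × Int) elve =>
        let maxR := st.1; let minR := st.2.1; let maxC := st.2.2.1; let minC := st.2.2.2
        let (maxR, minR) :=
          if elve.1 > maxR then (elve.1, minR)
          else if elve.1 < minR then (maxR, elve.1)
          else (maxR, minR)
        let (maxC, minC) :=
          if elve.2 > maxC then (elve.2, minC)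
          else if elve.2 < minC then (maxC, elve.2)
          else (maxC, minC)
        (maxR, minR, maxC, minC)) (mr, nr, mc, nc)
    = (elves.foldl (fun a e => max a e.1) mr,
       elves.foldl (fun a e => min a e.1) nr,
       elves.foldl (fun a e => max a e.2) mc,
       elves.foldl (fun a e => min a e.2) nc) := by
  induction elves with
  | nil => intro mr nr mc nc _ _; rfl
  | cons e t ih =>
    intro mr nr mc nc h1 h2
    simp only [List.foldl_cons]
    have step : (if e.1 > mr then (e.1, nr) else if e.1 < nr then (mr, e.1) else (mr, nr))
        = (max mr e.1, min nr e.1) := by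
      split_ifs <;> simp_all <;> omega
    have stepc : (if e.2 > mc then (e.2, nc) else if e.2 < nc then (mc, e.2) else (mc, nc))
        = (max mc e.2, min nc e.2) := by
      split_ifs <;> simp_all <;> omega
    simp only [step, stepc]
    rw [ih (max mr e.1) (min nr e.1) (max mc e.2) (min nc e.2) (by omega) (by omega)]

-- folded min is a member of a :: xs and a lower bound of it
theorem pv_foldl_min_mem (xs : List Int) : ∀ a : Int, xs.foldl min a ∈ a :: xs := by
  induction xs with
  | nil => intro a; simp
  | cons x t ih =>
    intro a
    simp only [List.foldl_cons]
    rcases List.mem_cons.mp (ih (min a x)) with h | h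
    · rcases min_choice a x with hm | hm <;> rw [h, hm] <;> simp
    · simp [h]

theorem pv_foldl_min_le (xs : List Int) : ∀ a : Int, ∀ y ∈ a :: xs, xs.foldl min a ≤ y := by
  induction xs with
  | nil => intro a y hy; simp at hy; subst hy; simp
  | cons x t ih =>
    intro a y hy
    simp only [List.foldl_cons]
    have h1 : t.foldl min (min a x) ≤ min a x := ih (min a x) (min a x) (by simp)
    rcases List.mem_cons.mp hy with h | h
    · subst h; exact le_trans h1 (min_le_left _ _)
    · rcases List.mem_cons.mp h with h' | h'
      · subst h'; exact le_trans h1 (min_le_right _ _)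
      · exact ih (min a x) y (by simp [h'])

theorem pv_foldl_max_mem (xs : List Int) : ∀ a : Int, xs.foldl max a ∈ a :: xs := by
  induction xs with
  | nil => intro a; simp
  | cons x t ih =>
    intro a
    simp only [List.foldl_cons]
    rcases List.mem_cons.mp (ih (max a x)) with h | h
    · rcases max_choice a x with hm | hm <;> rw [h, hm] <;> simp
    · simp [h]

theorem pv_foldl_max_ge (xs : List Int) : ∀ a : Int, ∀ y ∈ a :: xs, y ≤ xs.foldl max a := by
  induction xs with
  | nil => intro a y hy; simp at hy; subst hy; simp
  | cons x t ih =>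
    intro a y hy
    simp only [List.foldl_cons]
    have h1 : max a x ≤ t.foldl max (max a x) := ih (max a x) (max a x) (by simp)
    rcases List.mem_cons.mp hy with h | h
    · subst h; exact le_trans (le_max_left _ _) h1
    · rcases List.mem_cons.mp h with h' | h'
      · subst h'; exact le_trans (le_max_right _ _) h1
      · exact ih (max a x) y (by simp [h'])

-- in a ≤-pairwise list, the last element is an upper bound
theorem pv_getLast_ge (l : List Int) (hp : l.Pairwise (· ≤ ·)) (h : l ≠ []) :
    ∀ y ∈ l, y ≤ l.getLast h := by
  induction l with
  | nil => simp at h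
  | cons a t ih =>
    rcases List.pairwise_cons.mp hp with ⟨ha, ht⟩
    intro y hy
    cases t with
    | nil => simp at hy; simp [hy, List.getLast]
    | cons b u =>
      rw [List.getLast_cons (by simp)]
      rcases List.mem_cons.mp hy with h' | h'
      · subst h'
        exact le_trans (ha _ (List.getLast_mem _)) (le_refl _)
      · exact ih ht (by simp) y h'

-- first and last of the sorted 0-seeded list are the folded min and max
theorem pv_sorted_ends (xs : List Int) :
    (PySem.List.pyGet? (PySem.List.sorted (xs ++ [0]) (fun x => x) false) 0).getD 0
      = xs.foldl min 0
    ∧ (PySem.List.pyGet? (PySem.List.sorted (xs ++ [0]) (fun x => x) false) (-1)).getD 0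
      = xs.foldl max 0 := by
  set l := PySem.List.sorted (xs ++ [0]) (fun x => x) false with hl
  have hperm : l.Perm (xs ++ [0]) := PySem.List.sorted_perm _ _ _
  have hmem : ∀ y, y ∈ l ↔ y ∈ xs ++ [0] := fun y => hperm.mem_iff
  have hne : l ≠ [] := by
    intro h0
    have := hperm.length_eq
    simp [h0] at this
  have hmem0 : ∀ y, y ∈ l ↔ y ∈ (0 : Int) :: xs := by
    intro y; rw [hmem]; simp [or_comm]
  have hpw : l.Pairwise (· ≤ ·) := by
    have := PySem.List.sorted_pairwise (xs := xs ++ [0]) (key := fun x => x)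
    simpa using this
  constructor
  · -- head
    obtain ⟨m, t, hcons⟩ := List.exists_cons_of_ne_nil hne
    rw [hcons, PySem.List.pyGet?_zero_cons, Option.getD_some]
    have hle : ∀ y ∈ xs ++ [0], m ≤ y := by
      have := PySem.List.key_head_sorted_le (xs := xs ++ [0]) (key := fun x => x) (by rw [← hl, hcons])
      simpa using this
    have hm_mem : m ∈ (0:Int) :: xs := (hmem0 m).mp (by simp [hcons])
    refine le_antisymm ?_ ?_
    · exact hle (xs.foldl min 0) (by
        have := pv_foldl_min_mem xs 0
        rcases List.mem_cons.mp this with h | h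
        · simp [h]
        · simp [h])
    · rcases List.mem_cons.mp hm_mem with h | h
      · rw [h]; exact pv_foldl_min_le xs 0 0 (by simp)
      · exact pv_foldl_min_le xs 0 m (by simp [h])
  · -- last
    rw [PySem.List.pyGet?_neg_one, List.getLast?_eq_some_getLast hne, Option.getD_some]
    have hge : ∀ y ∈ l, y ≤ l.getLast hne := pv_getLast_ge l hpw hne
    have hlast_mem : l.getLast hne ∈ (0:Int) :: xs := (hmem0 _).mp (List.getLast_mem hne)
    refine le_antisymm ?_ ?_
    · rcases List.mem_cons.mp hlast_mem with h | h
      · rw [h]; exact pv_foldl_max_ge xs 0 0 (by simp)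
      · exact pv_foldl_max_ge xs 0 _ (by simp [h])
    · refine hge _ ?_
      rw [hmem0]
      have := pv_foldl_max_mem xs 0
      rcases List.mem_cons.mp this with h | h
      · simp [h]
      · simp [h]

theorem find_empty_squares_eq_alt (elves : List (Int × Int)) :
    find_empty_squares elves = find_empty_squares_alt elves := by
  unfold find_empty_squares find_empty_squares_alt
  rw [pv_loop_extrema elves 0 0 0 0 le_rfl le_rfl]
  obtain ⟨hr0, hr1⟩ := pv_sorted_ends (elves.map (·.1))
  obtain ⟨hc0, hc1⟩ := pv_sorted_ends (elves.map (·.2))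
  simp only [hr0, hr1, hc0, hc1, List.foldl_map]

-- ===== VERDICT (by name: the statement is the Claim_ definition above) =====
theorem find_empty_squares_spec : Claim_equal_find_empty_squares := by
  intro elves _
  unfold Spec_find_empty_squares
  exact find_empty_squares_eq_alt elves
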